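-- pv_equiv track=rewrite | github.com/Joshmantova/Data_science_job_market_analysis_project | src/data_cleaning.py | get_num_applicants_int
-- ===== SOURCE A (Python) =====
-- def get_num_applicants_int(x):
--     num = str()
--     for elem in x:
--         if elem == 'B':
--             num = 20
--             break
--         elif elem == 'O':
--             num = 200
--             break
--         elif elem != ' ':
--             num += elem
--         elif elem == ' ':
--             break
--     return int(num)
-- ===== SOURCE B (Python) =====
-- def get_num_applicants_int(x):
--     token = x.partition(' ')[0]
--     ib = token.find('B')
--     io = token.find('O')
--     if ib != -1 and (io == -1 or ib < io):
--         return 20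
--     if io != -1:
--         return 200
--     return int(token)
-- ===== Notes on version B (the rewrite author's own statement) =====
-- stated objective: simpler
-- what changed: Replaced A's character-by-character accumulator loop (with four in-loop branches and break sentinels) by a decomposition: take the token before the first space with str.partition, compare the first indices of 'B' and 'O' via str.find, else int(token).
import Mathlib
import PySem

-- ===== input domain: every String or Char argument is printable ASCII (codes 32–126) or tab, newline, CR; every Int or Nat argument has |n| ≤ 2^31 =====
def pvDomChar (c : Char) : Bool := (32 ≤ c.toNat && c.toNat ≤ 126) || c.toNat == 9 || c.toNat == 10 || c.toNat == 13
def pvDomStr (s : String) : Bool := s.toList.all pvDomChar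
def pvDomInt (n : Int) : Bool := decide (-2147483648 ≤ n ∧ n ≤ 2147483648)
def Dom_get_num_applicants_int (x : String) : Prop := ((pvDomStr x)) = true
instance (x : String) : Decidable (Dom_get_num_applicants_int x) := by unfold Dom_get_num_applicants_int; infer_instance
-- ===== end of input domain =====

-- B replaces A's character-by-character accumulator loop by a decomposition: take the
-- substring before the first space, compare the first indices of 'B' and 'O' found by
-- str.find, else parse the token as an int (objective: simpler).

-- ===== PORT A =====
-- A's for-loop: accumulate non-special chars; break with 20 / 200 / int(acc).
-- `none` = the ValueError of int() on an unparseable accumulated string (excluded by Pre_).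
def pvALoop : List Char → List Char → Option Int
  | [], acc => PySem.Int.ofChars? acc
  | c :: cs, acc =>
    if c = 'B' then some 20
    else if c = 'O' then some 200
    else if c ≠ ' ' then pvALoop cs (acc ++ [c])
    else PySem.Int.ofChars? acc

def get_num_applicants_int (x : String) : Int := (pvALoop x.toList []).getD 0

-- ===== PORT B =====
-- x.partition(' ')[0] ported by hand (exact): chars before the first ' ', or all of x.
def get_num_applicants_int_alt (x : String) : Int :=
  let cs := x.toList
  let isp := PySem.Chars.find cs [' ']
  let token := if isp = -1 then cs else cs.take isp.toNat
  let ib := PySem.Chars.find token ['B']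
  let io := PySem.Chars.find token ['O']
  if ib ≠ -1 ∧ (io = -1 ∨ ib < io) then 20
  else if io ≠ -1 then 200
  else (PySem.Int.ofChars? token).getD 0

-- ===== PRECONDITION & SPEC =====
-- Pre_ excludes exactly the inputs where A's int() raises ValueError: no 'B'/'O'/' '
-- stops the scan early at 'B' or 'O', and the scanned prefix is not a Python int literal.
def Pre_get_num_applicants_int (x : String) : Prop :=
  let t := x.toList.takeWhile (fun c => !(c == 'B' || c == 'O' || c == ' '))
  (x.toList.drop t.length).head? = some 'B' ∨ (x.toList.drop t.length).head? = some 'O'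
    ∨ (PySem.Int.ofChars? t).isSome = true
instance (x : String) : Decidable (Pre_get_num_applicants_int x) := by
  unfold Pre_get_num_applicants_int; infer_instance
def pvWitness_get_num_applicants_int : String := "12"

def Spec_get_num_applicants_int (x : String) (out : Int) : Prop := out = get_num_applicants_int_alt x
instance (x : String) (out : Int) : Decidable (Spec_get_num_applicants_int x out) := by unfold Spec_get_num_applicants_int; infer_instance

-- ===== CLAIM (what is proved, stated in full; the proofs are below) =====
def Claim_equal_get_num_applicants_int : Prop := ∀ (x : String), Dom_get_num_applicants_int x → Pre_get_num_applicants_int x → Spec_get_num_applicants_int x (get_num_applicants_int x)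

-- ===== LEMMAS AND PROOFS =====

-- the scan predicate: chars that A's loop accumulates
def pvKeep (c : Char) : Bool := !(c == 'B' || c == 'O' || c == ' ')

-- [c] is a prefix iff it is the head
theorem pv_prefix_single {c : Char} {l : List Char} : [c] <+: l ↔ l.head? = some c := by
  cases l with
  | nil => simp
  | cons a t => simp [List.cons_prefix_cons, eq_comm]

-- singleton infix iff membership
theorem pv_infix_single {c : Char} {l : List Char} : [c] <:+: l ↔ c ∈ l := by
  constructor
  · rintro ⟨s, t, rfl⟩; simp
  · intro h
    obtain ⟨s, t, rfl⟩ := List.append_of_mem h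
    exact ⟨s, t, by simp⟩

theorem pv_find_not_mem {l : List Char} {c : Char} (h : c ∉ l) :
    PySem.Chars.find l [c] = -1 := by
  rw [PySem.Chars.find_eq_neg_one_iff, pv_infix_single]; exact h

theorem pv_find_stop {t y : List Char} {c : Char} (h : c ∉ t) :
    PySem.Chars.find (t ++ c :: y) [c] = (t.length : Int) := by
  have hpos : 0 ≤ PySem.Chars.find (t ++ c :: y) [c] := by
    rw [PySem.Chars.find_nonneg_iff, pv_infix_single]; simp
  obtain ⟨hpre, hmin⟩ := PySem.Chars.find_spec hpos
  rw [pv_prefix_single, List.head?_drop] at hpre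
  set n := (PySem.Chars.find (t ++ c :: y) [c]).toNat with hn
  have hne' : ∀ i < n, (t ++ c :: y)[i]? ≠ some c := by
    intro i hi hcon
    exact hmin i hi (by rw [pv_prefix_single, List.head?_drop]; exact hcon)
  have hat : (t ++ c :: y)[t.length]? = some c := by simp
  have hle : n ≤ t.length := by
    by_contra hgt
    exact hne' t.length (by omega) hat
  have hnlt : ¬ n < t.length := by
    intro hlt
    have hg : (t ++ c :: y)[n]? = some t[n] := by
      rw [List.getElem?_append_left hlt]; simp [hlt]
    rw [hpre] at hg
    have : t[n] = c := by injection hg.symm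
    exact h (this ▸ List.getElem_mem _)
  have : n = t.length := by omega
  have h2 := Int.toNat_of_nonneg hpos
  omega

theorem pv_find_other {t y : List Char} {c d : Char} (hne : d ≠ c) (h : c ∉ t) :
    PySem.Chars.find (t ++ d :: y) [c] = -1 ∨ (t.length : Int) < PySem.Chars.find (t ++ d :: y) [c] := by
  by_cases hneg : PySem.Chars.find (t ++ d :: y) [c] = -1
  · exact Or.inl hneg
  · right
    have hpos : 0 ≤ PySem.Chars.find (t ++ d :: y) [c] := by
      have := PySem.Chars.neg_one_le_find (s := t ++ d :: y) (sub := [c])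
      omega
    obtain ⟨hpre, _⟩ := PySem.Chars.find_spec hpos
    rw [pv_prefix_single, List.head?_drop] at hpre
    set n := (PySem.Chars.find (t ++ d :: y) [c]).toNat with hn
    have h2 := Int.toNat_of_nonneg hpos
    by_contra hle
    push_neg at hle
    have hlt : n ≤ t.length := by omega
    rcases Nat.lt_or_ge n t.length with hl | hg
    · have hg' : (t ++ d :: y)[n]? = some t[n] := by
        rw [List.getElem?_append_left hl]; simp [hl]
      rw [hpre] at hg'
      have : t[n] = c := by injection hg'.symm
      exact h (this ▸ List.getElem_mem _)
    · have heq : n = t.length := by omega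
      have hg' : (t ++ d :: y)[n]? = some d := by rw [heq]; simp
      rw [hpre] at hg'
      exact hne (by injection hg'.symm)

-- characterization of A's loop: the scan stops at the first non-kept char
theorem pv_aLoop_eq (cs : List Char) : ∀ acc, pvALoop cs acc =
    (if (cs.dropWhile pvKeep).head? = some 'B' then some 20
     else if (cs.dropWhile pvKeep).head? = some 'O' then some 200
     else PySem.Int.ofChars? (acc ++ cs.takeWhile pvKeep)) := by
  induction cs with
  | nil => intro acc; simp [pvALoop]
  | cons c cs ih =>
    intro acc
    by_cases hB : c = 'B'
    · subst hB; simp [pvALoop, pvKeep]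
    · by_cases hO : c = 'O'
      · subst hO; simp [pvALoop, pvKeep]
      · by_cases hS : c = ' '
        · subst hS; simp [pvALoop, pvKeep]
        · have hk : pvKeep c = true := by simp [pvKeep, hB, hO, hS]
          have h1 : pvALoop (c :: cs) acc = pvALoop cs (acc ++ [c]) := by
            simp [pvALoop, hB, hO, hS]
          rw [h1, ih (acc ++ [c]), List.dropWhile_cons_of_pos hk, List.takeWhile_cons_of_pos hk]
          simp

-- heads of dropWhile fail the predicate
theorem pv_dropWhile_head (p : Char → Bool) : ∀ (l : List Char) c r', l.dropWhile p = c :: r' → p c = false := by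
  intro l
  induction l with
  | nil => intro c r' h; simp at h
  | cons a l ih =>
    intro c r' h
    by_cases hp : p a
    · rw [List.dropWhile_cons_of_pos hp] at h; exact ih _ _ h
    · rw [List.dropWhile_cons_of_neg hp] at h
      cases h; simpa using hp

-- the central lemma: with cs split as kept prefix t ++ rest r, A's stop-char value equals B's expression
theorem pv_main (t r : List Char) (htB : ('B' : Char) ∉ t) (htO : ('O' : Char) ∉ t)
    (htS : (' ' : Char) ∉ t) (hhd : ∀ c r', r = c :: r' → pvKeep c = false) :
    (if r.head? = some 'B' then (20 : Int) else if r.head? = some 'O' then 200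
     else (PySem.Int.ofChars? t).getD 0)
    = (let cs := t ++ r
       let isp := PySem.Chars.find cs [' ']
       let token := if isp = -1 then cs else cs.take isp.toNat
       let ib := PySem.Chars.find token ['B']
       let io := PySem.Chars.find token ['O']
       if ib ≠ -1 ∧ (io = -1 ∨ ib < io) then 20
       else if io ≠ -1 then 200
       else (PySem.Int.ofChars? token).getD 0) := by
  dsimp only
  cases r with
  | nil =>
    rw [List.append_nil]
    rw [pv_find_not_mem htS, if_pos rfl, pv_find_not_mem htB, pv_find_not_mem htO]
    simp
  | cons c r' =>
    have hc : pvKeep c = false := hhd c r' rfl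
    have hc' : c = 'B' ∨ c = 'O' ∨ c = ' ' := by
      by_contra hcon
      push_neg at hcon
      simp [pvKeep, hcon.1, hcon.2.1, hcon.2.2] at hc
    rcases hc' with rfl | rfl | rfl
    · -- scan stopped at 'B' → A returns 20
      have hB20 : ∀ y : List Char,
          (if PySem.Chars.find (t ++ 'B' :: y) ['B'] ≠ -1 ∧
              (PySem.Chars.find (t ++ 'B' :: y) ['O'] = -1 ∨
               PySem.Chars.find (t ++ 'B' :: y) ['B'] < PySem.Chars.find (t ++ 'B' :: y) ['O'])
           then (20 : Int)
           else if PySem.Chars.find (t ++ 'B' :: y) ['O'] ≠ -1 then 200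
           else (PySem.Int.ofChars? (t ++ 'B' :: y)).getD 0) = 20 := by
        intro y
        rw [pv_find_stop htB]
        rcases pv_find_other (by decide : ('B' : Char) ≠ 'O') htO (y := y) with hio | hio
        · rw [if_pos ⟨by omega, Or.inl hio⟩]
        · rw [if_pos ⟨by omega, Or.inr (by omega)⟩]
      rcases pv_find_other (by decide : ('B' : Char) ≠ ' ') htS (y := r') with hisp | hisp
      · rw [hisp, if_pos rfl, List.head?_cons, if_pos rfl, hB20 r']
      · have hne : PySem.Chars.find (t ++ 'B' :: r') [' '] ≠ -1 := by omega
        rw [if_neg hne]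
        have htk : (t ++ 'B' :: r').take (PySem.Chars.find (t ++ 'B' :: r') [' ']).toNat
            = t ++ 'B' :: r'.take ((PySem.Chars.find (t ++ 'B' :: r') [' ']).toNat - t.length - 1) := by
          obtain ⟨m, hm⟩ : ∃ m, (PySem.Chars.find (t ++ 'B' :: r') [' ']).toNat - t.length = m + 1 :=
            ⟨(PySem.Chars.find (t ++ 'B' :: r') [' ']).toNat - t.length - 1, by omega⟩
          rw [List.take_append, List.take_of_length_le (by omega), hm,
              List.take_succ_cons]
          simp
        rw [htk, List.head?_cons, if_pos rfl, hB20 _]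
    · -- scan stopped at 'O' → A returns 200
      have hO200 : ∀ y : List Char,
          (if PySem.Chars.find (t ++ 'O' :: y) ['B'] ≠ -1 ∧
              (PySem.Chars.find (t ++ 'O' :: y) ['O'] = -1 ∨
               PySem.Chars.find (t ++ 'O' :: y) ['B'] < PySem.Chars.find (t ++ 'O' :: y) ['O'])
           then (20 : Int)
           else if PySem.Chars.find (t ++ 'O' :: y) ['O'] ≠ -1 then 200
           else (PySem.Int.ofChars? (t ++ 'O' :: y)).getD 0) = 200 := by
        intro y
        rw [pv_find_stop htO]
        rcases pv_find_other (by decide : ('O' : Char) ≠ 'B') htB (y := y) with hib | hib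
        · rw [if_neg (by simp [hib]), if_pos (show (t.length : Int) ≠ -1 by omega)]
        · rw [if_neg (by rintro ⟨-, h | h⟩ <;> omega),
              if_pos (show (t.length : Int) ≠ -1 by omega)]
      rcases pv_find_other (by decide : ('O' : Char) ≠ ' ') htS (y := r') with hisp | hisp
      · rw [hisp, if_pos rfl, List.head?_cons, if_neg (by decide), if_pos rfl, hO200 r']
      · have hne : PySem.Chars.find (t ++ 'O' :: r') [' '] ≠ -1 := by omega
        rw [if_neg hne]
        have htk : (t ++ 'O' :: r').take (PySem.Chars.find (t ++ 'O' :: r') [' ']).toNat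
            = t ++ 'O' :: r'.take ((PySem.Chars.find (t ++ 'O' :: r') [' ']).toNat - t.length - 1) := by
          obtain ⟨m, hm⟩ : ∃ m, (PySem.Chars.find (t ++ 'O' :: r') [' ']).toNat - t.length = m + 1 :=
            ⟨(PySem.Chars.find (t ++ 'O' :: r') [' ']).toNat - t.length - 1, by omega⟩
          rw [List.take_append, List.take_of_length_le (by omega), hm,
              List.take_succ_cons]
          simp
        rw [htk, List.head?_cons, if_neg (by decide), if_pos rfl, hO200 _]
    · -- scan stopped at ' ' → both parse the kept prefix t
      rw [List.head?_cons, if_neg (show ¬ (some ' ' = some 'B') by decide),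
          if_neg (show ¬ (some ' ' = some 'O') by decide)]
      rw [pv_find_stop htS, if_neg (show (t.length : Int) ≠ -1 by omega),
          Int.toNat_natCast, List.take_left, pv_find_not_mem htB, pv_find_not_mem htO,
          if_neg (by simp), if_neg (by simp)]

-- ===== VERDICT (by name: the statement is the Claim_ definition above) =====
theorem get_num_applicants_int_spec : Claim_equal_get_num_applicants_int := by
  intro x _ _
  unfold Spec_get_num_applicants_int get_num_applicants_int
  rw [pv_aLoop_eq]
  have htB : ('B' : Char) ∉ x.toList.takeWhile pvKeep := by
    intro hm; have := List.mem_takeWhile_imp hm; simp [pvKeep] at this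
  have htO : ('O' : Char) ∉ x.toList.takeWhile pvKeep := by
    intro hm; have := List.mem_takeWhile_imp hm; simp [pvKeep] at this
  have htS : (' ' : Char) ∉ x.toList.takeWhile pvKeep := by
    intro hm; have := List.mem_takeWhile_imp hm; simp [pvKeep] at this
  have hhd : ∀ c r', x.toList.dropWhile pvKeep = c :: r' → pvKeep c = false :=
    fun c r' h => pv_dropWhile_head pvKeep x.toList c r' h
  have key := pv_main (x.toList.takeWhile pvKeep) (x.toList.dropWhile pvKeep) htB htO htS hhd
  rw [List.takeWhile_append_dropWhile] at key
  rw [get_num_applicants_int_alt, ← key]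
  split_ifs <;> simp
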